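-- pv_equiv track=rewrite | github.com/pyther-hub/ml4sci-faseroh-POC | metrics.py | _is_valid_prefix
-- ===== SOURCE A (Python) =====
-- _ARITY = {
--     "+": 2, "mul": 2, "pow": 2,
--     "sqrt": 1, "exp": 1, "log": 1, "sin": 1, "cos": 1, "tan": 1, "abs": 1,
-- }
--
-- def _is_valid_prefix(tokens: list[str]) -> bool:
--     """Check if a prefix token sequence forms a valid expression tree.
--
--     Parameters
--     ----------
--     tokens : list[str]  token sequence (without <sos>/<eos>/<pad>)
--
--     Returns
--     -------
--     bool
--     """
--     if not tokens:
--         return False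
--     counter = 1  # expecting one expression
--     for tok in tokens:
--         if counter <= 0:
--             return False
--         counter -= 1
--         arity = _ARITY.get(tok, None)
--         if arity is not None:
--             counter += arity
--         # leaves (x, ints, C-tokens) have arity 0 → no addition
--     return counter == 0
-- ===== SOURCE B (Python) =====
-- _ARITY = {
--     "+": 2, "mul": 2, "pow": 2,
--     "sqrt": 1, "exp": 1, "log": 1, "sin": 1, "cos": 1, "tan": 1, "abs": 1,
-- }
--
-- def _is_valid_prefix(tokens: list[str]) -> bool:
--     """Right-to-left postfix evaluation: count completed subtrees.
--
--     Reading the sequence backwards, a leaf yields one complete subtree and an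
--     operator of arity a consumes a completed subtrees and yields one; the
--     sequence is a valid prefix expression iff no operator ever lacks its
--     operands and exactly one tree remains at the end.
--     """
--     done = 0  # completed subtrees so far
--     for tok in reversed(tokens):
--         need = _ARITY.get(tok, 0)
--         if done < need:
--             return False
--         done += 1 - need
--     return done == 1
-- ===== Notes on version B (the rewrite author's own statement) =====
-- stated objective: alternative
-- what changed: B validates by evaluating the sequence right-to-left as postfix reduction (counting completed subtrees, each operator consuming its operands), instead of A's left-to-right scan of a pending expected-operand counter.
import Mathlib
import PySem

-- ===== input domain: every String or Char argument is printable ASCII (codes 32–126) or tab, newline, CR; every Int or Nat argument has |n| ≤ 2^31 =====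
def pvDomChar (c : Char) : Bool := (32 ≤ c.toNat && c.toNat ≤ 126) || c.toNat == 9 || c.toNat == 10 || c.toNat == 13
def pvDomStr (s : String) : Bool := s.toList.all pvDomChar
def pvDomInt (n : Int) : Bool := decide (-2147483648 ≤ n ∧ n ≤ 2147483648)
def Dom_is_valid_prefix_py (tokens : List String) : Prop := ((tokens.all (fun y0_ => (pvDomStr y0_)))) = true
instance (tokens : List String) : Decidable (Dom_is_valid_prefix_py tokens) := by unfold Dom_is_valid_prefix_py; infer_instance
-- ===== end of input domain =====

-- B validates by right-to-left postfix reduction (counting completed subtrees) instead of A's left-to-right pending-operand counter; same O(n) cost, return-value equivalence.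


-- ===== PORT A =====
-- the module constant _ARITY (shared by both Python files)
def pvARITY : PySem.Dict String Int :=
  PySem.Dict.mk [("+", 2), ("mul", 2), ("pow", 2),
    ("sqrt", 1), ("exp", 1), ("log", 1), ("sin", 1), ("cos", 1), ("tan", 1), ("abs", 1)]

-- A's for-loop over tokens with the running counter (early 'return False' = result false)
def pvLoopA : Int → List String → Bool
  | c, [] => c == 0
  | c, t :: ts =>
    if c ≤ 0 then false
    else
      let c := c - 1
      let c := match PySem.Dict.get? pvARITY t with
        | some a => c + a
        | none => c
      pvLoopA c ts

def is_valid_prefix_py (tokens : List String) : Bool :=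
  if tokens = [] then false else pvLoopA 1 tokens

-- ===== PORT B =====
-- B's for-loop over reversed(tokens): 'done' counts completed subtrees
def pvLoopB : Int → List String → Bool
  | done, [] => done == 1
  | done, t :: rs =>
    let need := PySem.Dict.getD pvARITY t 0
    if done < need then false else pvLoopB (done + 1 - need) rs

def is_valid_prefix_py_alt (tokens : List String) : Bool :=
  pvLoopB 0 tokens.reverse

-- ===== PRECONDITION & SPEC =====
def Spec_is_valid_prefix_py (tokens : List String) (out : Bool) : Prop := out = is_valid_prefix_py_alt tokens
instance (tokens : List String) (out : Bool) : Decidable (Spec_is_valid_prefix_py tokens out) := by unfold Spec_is_valid_prefix_py; infer_instance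

-- ===== CLAIM (what is proved, stated in full; the proofs are below) =====
def Claim_equal_is_valid_prefix_py : Prop := ∀ (tokens : List String), Dom_is_valid_prefix_py tokens → Spec_is_valid_prefix_py tokens (is_valid_prefix_py tokens)

-- ===== LEMMAS AND PROOFS =====

-- arity of a token minus one (A's net counter change per token)
def pvG (t : String) : Int := PySem.Dict.getD pvARITY t 0 - 1
-- one minus arity (B's net change per token); pvH t = -(pvG t)
def pvH (t : String) : Int := 1 - PySem.Dict.getD pvARITY t 0

lemma pvH_eq_neg_g (t : String) : pvH t = -(pvG t) := by
  simp [pvH, pvG]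

lemma pvSumH_eq_neg_sumG (l : List String) : (l.map pvH).sum = -((l.map pvG).sum) := by
  induction l with
  | nil => simp
  | cons t ts ih => simp [ih, pvH_eq_neg_g]; ring

lemma pvArity_match (c : Int) (t : String) :
    (match PySem.Dict.get? pvARITY t with
      | some a => c + a
      | none => c) = c + PySem.Dict.getD pvARITY t 0 := by
  simp only [PySem.Dict.getD]
  cases PySem.Dict.get? pvARITY t <;> simp

-- characterisation of A's loop via partial sums of (arity - 1)
lemma pvA_char (ts : List String) : ∀ c : Int,
    pvLoopA c ts = true ↔
      ((∀ k < ts.length, 0 < c + ((ts.take k).map pvG).sum) ∧ c + (ts.map pvG).sum = 0) := by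
  induction ts with
  | nil =>
    intro c
    simp [pvLoopA]
  | cons t ts ih =>
    intro c
    by_cases hc : c ≤ 0
    · simp only [pvLoopA, if_pos hc]
      constructor
      · intro h; exact absurd h (by simp)
      · rintro ⟨hmid, -⟩
        have := hmid 0 (by simp)
        simp at this; omega
    · simp only [pvLoopA, if_neg hc, pvArity_match]
      have : c - 1 + PySem.Dict.getD pvARITY t 0 = c + pvG t := by simp [pvG]; ring
      rw [this, ih]
      constructor
      · rintro ⟨hmid, hfin⟩
        refine ⟨?_, by simp [List.sum_cons]; omega⟩
        intro k hk
        cases k with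
        | zero => simpa using hc
        | succ j =>
          have := hmid j (by simpa using hk)
          simp only [List.take_succ_cons, List.map_cons, List.sum_cons]
          omega
      · rintro ⟨hmid, hfin⟩
        refine ⟨?_, by simp [List.sum_cons] at hfin; omega⟩
        intro j hj
        have := hmid (j + 1) (by simpa using hj)
        simp only [List.take_succ_cons, List.map_cons, List.sum_cons] at this
        omega

-- characterisation of B's loop via partial sums of (1 - arity)
lemma pvB_char (rs : List String) : ∀ d : Int,
    pvLoopB d rs = true ↔
      ((∀ j < rs.length, 0 < d + ((rs.take (j + 1)).map pvH).sum) ∧ d + (rs.map pvH).sum = 1) := by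
  induction rs with
  | nil =>
    intro d
    simp [pvLoopB]
  | cons t rs ih =>
    intro d
    by_cases hd : d < PySem.Dict.getD pvARITY t 0
    · simp only [pvLoopB, if_pos hd]
      constructor
      · intro h; exact absurd h (by simp)
      · rintro ⟨hmid, -⟩
        have := hmid 0 (by simp)
        simp [pvH] at this; omega
    · simp only [pvLoopB, if_neg hd]
      have : d + 1 - PySem.Dict.getD pvARITY t 0 = d + pvH t := by simp [pvH]; ring
      rw [this, ih]
      constructor
      · rintro ⟨hmid, hfin⟩
        refine ⟨?_, by simp [List.sum_cons]; omega⟩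
        intro j hj
        cases j with
        | zero => simp [pvH]; omega
        | succ i =>
          have := hmid i (by simpa using hj)
          simp only [List.take_succ_cons, List.map_cons, List.sum_cons]
          omega
      · rintro ⟨hmid, hfin⟩
        refine ⟨?_, by simp [List.sum_cons] at hfin; omega⟩
        intro i hi
        have := hmid (i + 1) (by simpa using hi)
        simp only [List.take_succ_cons, List.map_cons, List.sum_cons] at this
        omega

-- sum over a prefix of the reversed list = total minus the complementary prefix sum
lemma pvTakeRev_sum (ts : List String) (m : Nat) :
    ((ts.reverse.take m).map pvH).sum
      = (ts.map pvH).sum - ((ts.take (ts.length - m)).map pvH).sum := by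
  rw [List.take_reverse, List.map_reverse, List.sum_reverse]
  have h := List.take_append_drop (ts.length - m) ts
  have : (ts.map pvH).sum = ((ts.take (ts.length - m)).map pvH).sum + ((ts.drop (ts.length - m)).map pvH).sum := by
    conv_lhs => rw [← h]
    simp
  omega

lemma pvTake_sumH (ts : List String) (k : Nat) :
    ((ts.take k).map pvH).sum = -(((ts.take k).map pvG).sum) := pvSumH_eq_neg_sumG _

-- the two loops agree from their initial states
lemma pvLoops_agree (ts : List String) : pvLoopA 1 ts = pvLoopB 0 ts.reverse := by
  rw [Bool.eq_iff_iff, pvA_char, pvB_char]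
  have htot : (ts.reverse.map pvH).sum = -((ts.map pvG).sum) := by
    rw [List.map_reverse, List.sum_reverse, pvSumH_eq_neg_sumG]
  constructor
  · rintro ⟨hmid, hfin⟩
    refine ⟨?_, by omega⟩
    intro j hj
    rw [pvTakeRev_sum, pvSumH_eq_neg_sumG ts, pvTake_sumH]
    have hlt : ts.length - (j + 1) < ts.length := by
      simp [List.length_reverse] at hj; omega
    have := hmid (ts.length - (j + 1)) hlt
    omega
  · rintro ⟨hmid, hfin⟩
    rw [htot] at hfin
    refine ⟨?_, by omega⟩
    intro k hk
    have hj : ts.length - (k + 1) < ts.reverse.length := by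
      simp [List.length_reverse]; omega
    have := hmid (ts.length - (k + 1)) hj
    rw [pvTakeRev_sum, pvSumH_eq_neg_sumG ts, pvTake_sumH] at this
    have hidx : ts.length - (ts.length - (k + 1) + 1) = k := by omega
    rw [hidx] at this
    omega

-- ===== VERDICT (by name: the statement is the Claim_ definition above) =====
theorem is_valid_prefix_py_spec : Claim_equal_is_valid_prefix_py := by
  intro tokens _
  unfold Spec_is_valid_prefix_py is_valid_prefix_py is_valid_prefix_py_alt
  by_cases h : tokens = []
  · subst h; simp [pvLoopB]
  · rw [if_neg h, pvLoops_agree]
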